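-- pv_equiv track=rewrite | github.com/tnzw/tnzw.github.io | py3/def/io_parsemode.py | io_parsemode
-- ===== SOURCE A (Python) =====
-- def io_parsemode(mode):
--   p,a,b,r,t,w,x = "","","","","","",""
--   for _ in mode:
--     if   _ == "+": p += "+"
--     elif _ == "a": a += "a"
--     elif _ == "b": b += "b"
--     elif _ == "r": r += "r"
--     elif _ == "t": t += "t"
--     #elif _ == "U": U = r = 1
--     elif _ == "w": w += "w"
--     elif _ == "x": x += "x"
--     else: ValueError(f"invalid mode: {mode!r}")
--   if any(len(_) > 1 for _ in (p,a,b,r,t,w,x)): raise ValueError(f"invalid mode: {mode!r}")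
--   #if U:
--   #  if x or w or a or u: raise ValueError("mode U cannot be combined with 'x', 'w', 'a', or '+'")
--   #  raise DeprecationWarning("'U' mode is deprecated")
--   if t and b: raise ValueError("can't have text and binary mode at once")
--   _ = len(x+r+w+a)
--   if _ < 1: raise ValueError("must have exactly one of create/read/write/append mode and at most one plus")
--   if _ > 1: raise ValueError("must have exactly one of create/read/write/append mode")
--   return p,a,b,r,t,w,x
-- ===== SOURCE B (Python) =====
-- def io_parsemode(mode):
--   # duplicate detection restricted to the known chars: unknown chars stay silently ignored, as in A
--   if any(mode.count(c) > 1 for c in '+abrtwx'):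
--     raise ValueError(f"invalid mode: {mode!r}")
--   p = '+' if '+' in mode else ''
--   a = 'a' if 'a' in mode else ''
--   b = 'b' if 'b' in mode else ''
--   r = 'r' if 'r' in mode else ''
--   t = 't' if 't' in mode else ''
--   w = 'w' if 'w' in mode else ''
--   x = 'x' if 'x' in mode else ''
--   if t and b: raise ValueError("can't have text and binary mode at once")
--   cnt = len(x + r + w + a)
--   if cnt < 1: raise ValueError("must have exactly one of create/read/write/append mode and at most one plus")
--   if cnt > 1: raise ValueError("must have exactly one of create/read/write/append mode")
--   return p, a, b, r, t, w, x
-- ===== Notes on version B (the rewrite author's own statement) =====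
-- stated objective: simpler
-- what changed: Replaces the character-by-character accumulator loop over the mode string with direct membership tests ('+' in mode, ...) for each of the seven flags, plus a count-based duplicate check restricted to the known characters so unknown characters stay silently ignored as in A.
import Mathlib
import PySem

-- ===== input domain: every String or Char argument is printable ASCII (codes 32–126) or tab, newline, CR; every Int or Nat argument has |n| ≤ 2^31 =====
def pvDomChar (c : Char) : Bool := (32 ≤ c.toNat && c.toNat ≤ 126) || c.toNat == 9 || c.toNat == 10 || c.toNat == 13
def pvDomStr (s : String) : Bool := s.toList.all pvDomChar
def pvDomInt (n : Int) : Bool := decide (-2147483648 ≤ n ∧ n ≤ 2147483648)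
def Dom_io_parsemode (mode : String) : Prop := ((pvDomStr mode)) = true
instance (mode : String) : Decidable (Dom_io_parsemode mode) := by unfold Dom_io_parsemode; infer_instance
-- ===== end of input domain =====

-- B computes each of the seven flag strings by a direct membership test instead of A's
-- character-by-character accumulator loop (objective: simpler); equal on all non-raising inputs.


-- ===== PORT A =====
-- one step of A's for-loop: the elif chain appending the matched char to its accumulator;
-- the final 'else: ValueError(...)' only CONSTRUCTS the exception (no raise), so it is a no-op.
def pvStepA (st : List Char × List Char × List Char × List Char × List Char × List Char × List Char)
    (c : Char) : List Char × List Char × List Char × List Char × List Char × List Char × List Char :=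
  let (p, a, b, r, t, w, x) := st
  if c = '+' then (p ++ ['+'], a, b, r, t, w, x)
  else if c = 'a' then (p, a ++ ['a'], b, r, t, w, x)
  else if c = 'b' then (p, a, b ++ ['b'], r, t, w, x)
  else if c = 'r' then (p, a, b, r ++ ['r'], t, w, x)
  else if c = 't' then (p, a, b, r, t ++ ['t'], w, x)
  else if c = 'w' then (p, a, b, r, t, w ++ ['w'], x)
  else if c = 'x' then (p, a, b, r, t, w, x ++ ['x'])
  else st

-- A's post-loop checks (duplicates / t-and-b / count of x+r+w+a) only RAISE ValueError;
-- Pre_io_parsemode excludes exactly those inputs, so the port returns the accumulated tuple.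
def io_parsemode (mode : String) : String × String × String × String × String × String × String :=
  let (p, a, b, r, t, w, x) := mode.toList.foldl pvStepA ([], [], [], [], [], [], [])
  (String.ofList p, String.ofList a, String.ofList b, String.ofList r, String.ofList t, String.ofList w, String.ofList x)

-- ===== PORT B =====
-- '<c>' if c in mode else ''
def pvPick (l : List Char) (c : Char) : String :=
  if l.contains c then String.ofList [c] else ""

-- B's duplicate / t-and-b / count checks only RAISE; Pre_io_parsemode excludes those inputs.
def io_parsemode_alt (mode : String) : String × String × String × String × String × String × String :=
  let l := mode.toList
  (pvPick l '+', pvPick l 'a', pvPick l 'b', pvPick l 'r', pvPick l 't', pvPick l 'w', pvPick l 'x')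

-- ===== PRECONDITION & SPEC =====
-- Exactly the inputs on which A returns: no known mode character occurs twice, not both
-- 't' and 'b', and exactly one of 'x','r','w','a' (otherwise A raises ValueError).
def Pre_io_parsemode (mode : String) : Prop :=
  mode.toList.count '+' ≤ 1 ∧ mode.toList.count 'a' ≤ 1 ∧ mode.toList.count 'b' ≤ 1 ∧
  mode.toList.count 'r' ≤ 1 ∧ mode.toList.count 't' ≤ 1 ∧ mode.toList.count 'w' ≤ 1 ∧
  mode.toList.count 'x' ≤ 1 ∧
  ¬(mode.toList.contains 't' = true ∧ mode.toList.contains 'b' = true) ∧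
  mode.toList.count 'x' + mode.toList.count 'r' + mode.toList.count 'w' + mode.toList.count 'a' = 1
instance (mode : String) : Decidable (Pre_io_parsemode mode) := by unfold Pre_io_parsemode; infer_instance
def pvWitness_io_parsemode : String := "rb+"

def Spec_io_parsemode (mode : String) (out : String × String × String × String × String × String × String) : Prop := out = io_parsemode_alt mode
instance (mode : String) (out : String × String × String × String × String × String × String) : Decidable (Spec_io_parsemode mode out) := by unfold Spec_io_parsemode; infer_instance

-- ===== CLAIM (what is proved, stated in full; the proofs are below) =====
def Claim_equal_io_parsemode : Prop := ∀ (mode : String), Dom_io_parsemode mode → Pre_io_parsemode mode → Spec_io_parsemode mode (io_parsemode mode)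

-- ===== LEMMAS AND PROOFS =====

-- A's loop accumulates, for each known character, one copy per occurrence.
lemma foldl_stepA (l : List Char) (p a b r t w x : List Char) :
    l.foldl pvStepA (p, a, b, r, t, w, x) =
      (p ++ List.replicate (l.count '+') '+',
       a ++ List.replicate (l.count 'a') 'a',
       b ++ List.replicate (l.count 'b') 'b',
       r ++ List.replicate (l.count 'r') 'r',
       t ++ List.replicate (l.count 't') 't',
       w ++ List.replicate (l.count 'w') 'w',
       x ++ List.replicate (l.count 'x') 'x') := by
  induction l generalizing p a b r t w x with
  | nil => simp
  | cons c l ih =>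
    simp only [List.foldl_cons, pvStepA]
    split_ifs with h1 h2 h3 h4 h5 h6 h7 <;> subst_vars <;>
      simp [ih, List.count_cons, List.replicate_succ, *]

-- With at most one occurrence, the accumulated string is B's membership test.
lemma replicate_count_eq_pick (l : List Char) (c : Char) (h : l.count c ≤ 1) :
    String.ofList (List.replicate (l.count c) c) = pvPick l c := by
  unfold pvPick
  rcases Nat.le_one_iff_eq_zero_or_eq_one.mp h with h0 | h1
  · have hm : c ∉ l := List.count_eq_zero.mp h0
    simp only [h0, hm, List.replicate_zero, List.contains_eq_mem, decide_eq_true_eq, if_false]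
  · have hm : c ∈ l := List.count_pos_iff.mp (by omega)
    simp [h1, hm]

-- ===== VERDICT (by name: the statement is the Claim_ definition above) =====
theorem io_parsemode_spec : Claim_equal_io_parsemode := by
  intro mode _ hpre
  obtain ⟨h1, h2, h3, h4, h5, h6, h7, _, _⟩ := hpre
  unfold Spec_io_parsemode io_parsemode io_parsemode_alt
  simp only [foldl_stepA, List.nil_append]
  rw [replicate_count_eq_pick _ _ h1, replicate_count_eq_pick _ _ h2,
      replicate_count_eq_pick _ _ h3, replicate_count_eq_pick _ _ h4,
      replicate_count_eq_pick _ _ h5, replicate_count_eq_pick _ _ h6,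
      replicate_count_eq_pick _ _ h7]
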